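-- pv_equiv track=rewrite | github.com/Ivkalipt/prog | ipc/C7e.py | count_crossings
-- ===== SOURCE A (Python) =====
-- def count_crossings(river_description):
--     """
--     Подсчитывает минимальное количество переправ через реку и ее притоки.
--
--     Args:
--         river_description: Строка, описывающая притоки реки (L - левый, R - правый, B - оба берега).
--
--     Returns:
--         Минимальное количество переправ.
--     """
--
--     crossings = 0
--     current_side = 'L'  # Начальное положение - левый берег
--
--     for bank in river_description:
--         if bank == 'L':
--             if current_side == 'R':
--                 crossings += 1
--             current_side = 'L'
--         elif bank == 'R':
--             if current_side == 'L':
--                 crossings += 1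
--             current_side = 'R'
--         elif bank == 'B':
--             crossings += 1
--             current_side = 'R' if current_side == 'L' else 'L'
--
--     # Переправа в конечную точку
--     if current_side == 'L':
--         crossings += 1
--
--     return crossings
-- ===== SOURCE B (Python) =====
-- def count_crossings(river_description):
--     # Two-phase: first resolve the sequence of sides occupied, then count
--     # adjacent side changes, plus the final crossing if we end on the left.
--     sides = ['L']
--     for bank in river_description:
--         prev = sides[-1]
--         if bank == 'L':
--             sides.append('L')
--         elif bank == 'R':
--             sides.append('R')
--         elif bank == 'B':
--             sides.append('R' if prev == 'L' else 'L')
--         else: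
--             sides.append(prev)
--     crossings = sum(1 for a, b in zip(sides, sides[1:]) if a != b)
--     if sides[-1] == 'L':
--         crossings += 1
--     return crossings
-- ===== Notes on version B (the rewrite author's own statement) =====
-- stated objective: alternative
-- what changed: B replaces A's single fold carrying a (crossings, side) pair by a two-phase decomposition: it first materialises the resolved sequence of sides as a list, then counts crossings as the number of adjacent differences in that list plus a final left-bank crossing.
import Mathlib
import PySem

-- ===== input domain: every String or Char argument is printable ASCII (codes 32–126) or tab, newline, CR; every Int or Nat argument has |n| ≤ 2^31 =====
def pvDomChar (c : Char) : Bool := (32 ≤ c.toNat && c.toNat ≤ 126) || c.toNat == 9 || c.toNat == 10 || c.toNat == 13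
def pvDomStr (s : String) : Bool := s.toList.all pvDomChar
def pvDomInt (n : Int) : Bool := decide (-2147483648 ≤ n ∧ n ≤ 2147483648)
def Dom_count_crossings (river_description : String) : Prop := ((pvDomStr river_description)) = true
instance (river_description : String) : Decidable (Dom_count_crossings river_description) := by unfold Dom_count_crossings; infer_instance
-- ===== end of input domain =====

-- B is an alternative decomposition: build the resolved side path first, then count adjacent changes.

-- ===== PORT A =====
-- single fold over the string carrying (crossings, current_side)
def count_crossings (river_description : String) : Int :=
  let st := river_description.toList.foldl (fun (st : Int × Char) bank =>
    let crossings := st.1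
    let side := st.2
    if bank = 'L' then (if side = 'R' then crossings + 1 else crossings, 'L')
    else if bank = 'R' then (if side = 'L' then crossings + 1 else crossings, 'R')
    else if bank = 'B' then (crossings + 1, if side = 'L' then 'R' else 'L')
    else (crossings, side)) (0, 'L')
  if st.2 = 'L' then st.1 + 1 else st.1

-- ===== PORT B =====
-- the side occupied after seeing `bank`, given the previous side
def pvNextSide (prev bank : Char) : Char :=
  if bank = 'L' then 'L'
  else if bank = 'R' then 'R'
  else if bank = 'B' then (if prev = 'L' then 'R' else 'L')
  else prev

-- sum(1 for a, b in zip(l, l[1:]) if a != b)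
def pvTransCount (l : List Char) : Int :=
  ((l.zip l.tail).map (fun p => if p.1 ≠ p.2 then (1 : Int) else 0)).sum

def count_crossings_alt (river_description : String) : Int :=
  let sides := river_description.toList.foldl
    (fun sides bank => sides ++ [pvNextSide (sides.getLastD 'L') bank]) ['L']
  let crossings := pvTransCount sides
  if sides.getLastD 'L' = 'L' then crossings + 1 else crossings

-- ===== PRECONDITION & SPEC =====
def Spec_count_crossings (river_description : String) (out : Int) : Prop := out = count_crossings_alt river_description
instance (river_description : String) (out : Int) : Decidable (Spec_count_crossings river_description out) := by unfold Spec_count_crossings; infer_instance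

-- ===== CLAIM (what is proved, stated in full; the proofs are below) =====
def Claim_equal_count_crossings : Prop := ∀ (river_description : String), Dom_count_crossings river_description → Spec_count_crossings river_description (count_crossings river_description)

-- ===== LEMMAS AND PROOFS =====

-- the resolved side path, recursively
def pvPath : Char → List Char → List Char
  | _, [] => []
  | side, b :: rest => pvNextSide side b :: pvPath (pvNextSide side b) rest

-- number of side changes, recursively
def pvChanges : Char → List Char → Int
  | _, [] => 0
  | side, b :: rest =>
      (if pvNextSide side b ≠ side then 1 else 0) + pvChanges (pvNextSide side b) rest

theorem pvNextSide_mem (side b : Char) (h : side = 'L' ∨ side = 'R') :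
    pvNextSide side b = 'L' ∨ pvNextSide side b = 'R' := by
  unfold pvNextSide
  split_ifs <;> simp_all

theorem foldA_eq (cs : List Char) : ∀ (k : Int) (side : Char),
    (side = 'L' ∨ side = 'R') →
    cs.foldl (fun (st : Int × Char) bank =>
      let crossings := st.1
      let side := st.2
      if bank = 'L' then (if side = 'R' then crossings + 1 else crossings, 'L')
      else if bank = 'R' then (if side = 'L' then crossings + 1 else crossings, 'R')
      else if bank = 'B' then (crossings + 1, if side = 'L' then 'R' else 'L')
      else (crossings, side)) (k, side)
    = (k + pvChanges side cs, cs.foldl pvNextSide side) := by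
  induction cs with
  | nil => intro k side h; simp [pvChanges]
  | cons b rest ih =>
    intro k side h
    have h' := pvNextSide_mem side b h
    simp only [List.foldl_cons, pvChanges]
    rw [show (if b = 'L' then (if side = 'R' then k + 1 else k, 'L')
        else if b = 'R' then (if side = 'L' then k + 1 else k, 'R')
        else if b = 'B' then (k + 1, if side = 'L' then 'R' else 'L')
        else (k, side))
      = (k + (if pvNextSide side b ≠ side then 1 else 0), pvNextSide side b) from by
        unfold pvNextSide; rcases h with h | h <;> subst h <;> split_ifs <;> simp_all]
    rw [ih _ _ h']
    ring_nf

theorem foldB_eq (cs : List Char) : ∀ (acc : List Char) (x : Char),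
    acc ≠ [] → acc.getLastD 'L' = x →
    cs.foldl (fun sides bank => sides ++ [pvNextSide (sides.getLastD 'L') bank]) acc
    = acc ++ pvPath x cs := by
  induction cs with
  | nil => intro acc x _ _; simp [pvPath]
  | cons b rest ih =>
    intro acc x hne hlast
    simp only [List.foldl_cons, pvPath]
    rw [hlast, ih (acc ++ [pvNextSide x b]) (pvNextSide x b) (by simp)
        (by simp), List.append_assoc]
    simp

theorem trans_cons (a b : Char) (l : List Char) :
    pvTransCount (a :: b :: l) = (if a ≠ b then 1 else 0) + pvTransCount (b :: l) := by
  simp [pvTransCount]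

theorem trans_path (cs : List Char) : ∀ side : Char,
    pvTransCount (side :: pvPath side cs) = pvChanges side cs := by
  induction cs with
  | nil => intro side; simp [pvPath, pvChanges, pvTransCount]
  | cons b rest ih =>
    intro side
    simp only [pvPath, pvChanges]
    rw [trans_cons, ih]
    have : (if pvNextSide side b ≠ side then (1:Int) else 0)
         = (if side ≠ pvNextSide side b then 1 else 0) := by
      by_cases h : side = pvNextSide side b
      · rw [← h]
      · rw [if_pos (Ne.symm h), if_pos h]
    rw [← this]

theorem last_path (cs : List Char) : ∀ side : Char,
    (side :: pvPath side cs).getLastD 'L' = cs.foldl pvNextSide side := by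
  induction cs with
  | nil => intro side; simp [pvPath]
  | cons b rest ih =>
    intro side
    simp only [pvPath, List.foldl_cons]
    rw [show ((side :: pvNextSide side b :: pvPath (pvNextSide side b) rest).getLastD 'L')
        = ((pvNextSide side b :: pvPath (pvNextSide side b) rest).getLastD 'L') from by
          simp [List.getLastD]]
    exact ih (pvNextSide side b)

-- ===== VERDICT (by name: the statement is the Claim_ definition above) =====
theorem count_crossings_spec : Claim_equal_count_crossings := by
  intro s _
  unfold Spec_count_crossings count_crossings count_crossings_alt
  rw [foldA_eq s.toList 0 'L' (Or.inl rfl),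
      foldB_eq s.toList ['L'] 'L' (by simp) (by simp)]
  simp only [List.singleton_append]
  rw [trans_path, last_path]
  simp
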